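-- pv_equiv track=rewrite | github.com/geromt/complete-the-song | trabajar_texto.py | sep_palabras
-- ===== SOURCE A (Python) =====
-- def sep_palabras(texto):
--     '''funcion para separar todas las palabras de una oración y acomodarlas en
--     una lista anidada por frases
--         texto = lista de oraciones'''
--
--     texto_separado = []
--     for renglon in range(len(texto)):
--         frase_separada = []
--         indice_inferior = 0
--         for letra in range(len(texto[renglon])):
--             if texto[renglon][letra] == " ":
--                 indice_superior = letra + 1
--                 palabra = ""
--                 for caracter in range(indice_inferior, indice_superior):
--                     palabra += texto[renglon][caracter]
--                 indice_inferior = indice_superior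
--                 frase_separada.append(palabra)
--             elif texto[renglon][letra] == "\n":
--                 indice_superior = letra
--                 palabra = ""
--                 for caracter in range(indice_inferior, indice_superior):
--                     palabra += texto[renglon][caracter]
--                 indice_inferior = indice_superior
--                 frase_separada.append(palabra)
--
--         texto_separado.append(frase_separada)
--
--     return texto_separado
-- ===== SOURCE B (Python) =====
-- def sep_palabras(texto):
--     texto_separado = []
--     for renglon in texto:
--         posiciones = [i for i, c in enumerate(renglon) if c == " " or c == "\n"]
--         frase_separada = []
--         inf = 0
--         for p in posiciones:
--             if renglon[p] == " ":
--                 frase_separada.append(renglon[inf:p + 1])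
--                 inf = p + 1
--             else:
--                 frase_separada.append(renglon[inf:p])
--                 inf = p
--         texto_separado.append(frase_separada)
--     return texto_separado
-- ===== Notes on version B (the rewrite author's own statement) =====
-- stated objective: alternative
-- what changed: Instead of scanning every character and rebuilding each word character-by-character with an inner range loop, B first collects the delimiter (space/newline) positions of each line in one enumerate pass and then emits one slice per delimiter while advancing a lower cursor (past a space, onto a newline).
import Mathlib
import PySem

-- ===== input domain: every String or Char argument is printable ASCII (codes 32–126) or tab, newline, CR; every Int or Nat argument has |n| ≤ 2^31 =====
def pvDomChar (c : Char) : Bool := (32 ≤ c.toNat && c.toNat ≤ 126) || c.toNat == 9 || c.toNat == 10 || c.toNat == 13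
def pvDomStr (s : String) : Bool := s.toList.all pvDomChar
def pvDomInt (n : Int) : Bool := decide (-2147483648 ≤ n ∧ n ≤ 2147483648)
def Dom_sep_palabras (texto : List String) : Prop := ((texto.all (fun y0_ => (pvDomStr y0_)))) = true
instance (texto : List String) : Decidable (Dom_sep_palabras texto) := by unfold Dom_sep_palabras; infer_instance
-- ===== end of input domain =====

-- B re-decomposes each line: one pass collects the delimiter positions, then a loop over
-- only those positions emits slices (objective: alternative decomposition, no inner
-- character-by-character word building).

-- ===== PORT A =====
-- the innermost loop of A: palabra = ""; for caracter in range(inf, sup): palabra += renglon[caracter]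
def pvWordA (s : List Char) (inf sup : Int) : List Char :=
  (PySem.List.pyRange inf sup).foldl (fun w c => w ++ [PySem.List.pyGetD s c ' ']) []

-- the body of A's outer loop (one renglon)
def pvLineA (s : List Char) : List (List Char) :=
  ((PySem.List.pyRange 0 (PySem.List.len s)).foldl
    (fun (st : List (List Char) × Int) letra =>
      if PySem.List.pyGetD s letra ' ' = ' ' then
        (st.1 ++ [pvWordA s st.2 (letra + 1)], letra + 1)
      else if PySem.List.pyGetD s letra ' ' = '\n' then
        (st.1 ++ [pvWordA s st.2 letra], letra)
      else st)
    ([], 0)).1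

def sep_palabras (texto : List String) : List (List String) :=
  (PySem.List.pyRange 0 (PySem.List.len texto)).foldl
    (fun acc r => acc ++ [(pvLineA (PySem.List.pyGetD texto r "").toList).map String.ofList]) []

-- ===== PORT B =====
-- one renglon of B: delimiter positions first, then slices
def pvLineB (s : List Char) : List (List Char) :=
  (((((PySem.List.enumerate s).filter
        (fun ic => ic.2 == ' ' || ic.2 == '\n')).map Prod.fst)).foldl
    (fun (st : List (List Char) × Int) p =>
      if PySem.List.pyGetD s p ' ' = ' ' then
        (st.1 ++ [PySem.List.slice s (some st.2) (some (p + 1))], p + 1)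
      else
        (st.1 ++ [PySem.List.slice s (some st.2) (some p)], p))
    ([], 0)).1

def sep_palabras_alt (texto : List String) : List (List String) :=
  texto.map (fun renglon => (pvLineB renglon.toList).map String.ofList)

-- ===== PRECONDITION & SPEC =====
def Spec_sep_palabras (texto : List String) (out : List (List String)) : Prop := out = sep_palabras_alt texto
instance (texto : List String) (out : List (List String)) : Decidable (Spec_sep_palabras texto out) := by unfold Spec_sep_palabras; infer_instance

-- ===== CLAIM (what is proved, stated in full; the proofs are below) =====
def Claim_equal_sep_palabras : Prop := ∀ (texto : List String), Dom_sep_palabras texto → Spec_sep_palabras texto (sep_palabras texto)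

-- ===== LEMMAS AND PROOFS =====

-- the characters read one by one over range(a, a+k) are the slice of the line
lemma pvMap_pyRange_eq_drop_take (s : List Char) :
    ∀ (k : Nat) (a : Int), 0 ≤ a → a.toNat + k ≤ s.length →
      (PySem.List.pyRange a (a + k)).map (fun c => PySem.List.pyGetD s c ' ')
        = (s.drop a.toNat).take k := by
  intro k
  induction k with
  | zero =>
      intro a ha _
      simp [PySem.List.pyRange]
  | succ k ih =>
      intro a ha hlen
      have hlt : a < a + (k + 1 : Nat) := by push_cast; omega
      rw [PySem.List.pyRange_one_cons hlt, List.map_cons]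
      have hilt : a < (s.length : Int) := by omega
      rw [PySem.List.pyGetD_eq_getElem s ' ' ha hilt]
      have h1 : (a + 1).toNat = a.toNat + 1 := by omega
      have hbd : a + (k + 1 : Nat) = (a + 1) + (k : Nat) := by push_cast; ring
      rw [hbd, ih (a + 1) (by omega) (by omega)]
      have hlt' : a.toNat < s.length := by omega
      rw [List.drop_eq_getElem_cons hlt', List.take_succ_cons, h1]

-- a nonnegative, in-range slice is drop-then-take
lemma pvSlice_eq (s : List Char) (a b : Int) (ha : 0 ≤ a) (hab : a ≤ b) (hb : b ≤ s.length) :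
    PySem.List.slice s (some a) (some b) = (s.drop a.toNat).take (b - a).toNat := by
  have h1 : PySem.List.clampIdx s.length a = a.toNat := by
    unfold PySem.List.clampIdx
    rw [if_neg (by omega : ¬ a < 0)]
    omega
  have h2 : PySem.List.clampIdx s.length b = b.toNat := by
    unfold PySem.List.clampIdx
    rw [if_neg (by omega : ¬ b < 0)]
    omega
  simp only [PySem.List.slice, h1, h2]
  have h3 : b.toNat - a.toNat = (b - a).toNat := by omega
  rw [h3]

-- A's hand-built palabra equals B's slice
lemma pvWordA_eq_slice (s : List Char) (a b : Int) (ha : 0 ≤ a) (hab : a ≤ b) (hb : b ≤ s.length) :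
    pvWordA s a b = PySem.List.slice s (some a) (some b) := by
  unfold pvWordA
  rw [PySem.List.foldl_append_singleton_eq_map (fun c => PySem.List.pyGetD s c ' '), List.nil_append]
  have hk : a + (((b - a).toNat : Nat) : Int) = b := by omega
  have hmap := pvMap_pyRange_eq_drop_take s (b - a).toNat a ha (by omega)
  rw [hk] at hmap
  rw [pvSlice_eq s a b ha hab hb, hmap]

-- B's position list is the filtered index range
lemma pvPosB_eq (s : List Char) :
    ∀ (k : Int),
      ((PySem.List.enumerate s k).filter (fun ic => ic.2 == ' ' || ic.2 == '\n')).map Prod.fst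
        = (PySem.List.pyRange k (k + s.length)).filter
            (fun i => PySem.List.pyGetD s (i - k) ' ' == ' ' || PySem.List.pyGetD s (i - k) ' ' == '\n') := by
  induction s with
  | nil =>
      intro k
      simp [PySem.List.enumerate, PySem.List.pyRange]
  | cons c t ih =>
      intro k
      have hcons : PySem.List.enumerate (c :: t) k = (k, c) :: PySem.List.enumerate t (k + 1) := by
        simp [PySem.List.enumerate]
      have hlt : k < k + ((c :: t).length : Int) := by
        have : (0 : Int) < ((c :: t).length : Int) := by exact_mod_cast Nat.succ_pos t.length
        omega
      rw [hcons, PySem.List.pyRange_one_cons hlt]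
      have hget0 : PySem.List.pyGetD (c :: t) (k - k) ' ' = c := by
        simp [PySem.List.pyGetD, PySem.List.pyGet?, PySem.List.pyIdx?]
      have hbd : k + ((c :: t).length : Int) = (k + 1) + (t.length : Int) := by
        simp; ring
      have htail :
          (PySem.List.pyRange (k + 1) (k + ((c :: t).length : Int))).filter
              (fun i => PySem.List.pyGetD (c :: t) (i - k) ' ' == ' ' || PySem.List.pyGetD (c :: t) (i - k) ' ' == '\n')
            = (PySem.List.pyRange (k + 1) ((k + 1) + (t.length : Int))).filter
              (fun i => PySem.List.pyGetD t (i - (k + 1)) ' ' == ' ' || PySem.List.pyGetD t (i - (k + 1)) ' ' == '\n') := by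
        rw [hbd]
        apply List.filter_congr
        intro i hi
        have hik : k + 1 ≤ i := (PySem.List.mem_pyRange_one.mp hi).1
        have hshift : PySem.List.pyGetD (c :: t) (i - k) ' ' = PySem.List.pyGetD t (i - (k + 1)) ' ' := by
          rw [PySem.List.pyGetD_of_nonneg _ _ (by omega), PySem.List.pyGetD_of_nonneg _ _ (by omega)]
          have : (i - k).toNat = (i - (k + 1)).toNat + 1 := by omega
          rw [this]
          rfl
        rw [hshift]
      rw [List.filter_cons, List.filter_cons]
      simp only [hget0]
      by_cases hc : (c == ' ' || c == '\n') = true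
      · simp only [hc, if_pos]
        rw [List.map_cons, htail, ih (k + 1)]
      · simp only [hc, if_neg, Bool.false_eq_true, not_false_iff]
        rw [htail, ih (k + 1)]

-- the two per-position loop bodies agree while positions stay increasing and in range
lemma pvFoldAB (s : List Char) :
    ∀ (pos : List Int) (frase : List (List Char)) (inf : Int),
      0 ≤ inf →
      pos.Pairwise (· < ·) →
      (∀ q ∈ pos, inf ≤ q ∧ q < (s.length : Int) ∧
        (PySem.List.pyGetD s q ' ' = ' ' ∨ PySem.List.pyGetD s q ' ' = '\n')) →
      pos.foldl
        (fun (st : List (List Char) × Int) letra =>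
          if PySem.List.pyGetD s letra ' ' = ' ' then
            (st.1 ++ [pvWordA s st.2 (letra + 1)], letra + 1)
          else if PySem.List.pyGetD s letra ' ' = '\n' then
            (st.1 ++ [pvWordA s st.2 letra], letra)
          else st) (frase, inf)
        =
      pos.foldl
        (fun (st : List (List Char) × Int) p =>
          if PySem.List.pyGetD s p ' ' = ' ' then
            (st.1 ++ [PySem.List.slice s (some st.2) (some (p + 1))], p + 1)
          else
            (st.1 ++ [PySem.List.slice s (some st.2) (some p)], p)) (frase, inf) := by
  intro pos
  induction pos with
  | nil => intro frase inf _ _ _; rfl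
  | cons q rest ih =>
      intro frase inf hinf hpw hmem
      obtain ⟨hq1, hq2, hq3⟩ := hmem q List.mem_cons_self
      have hpw' := hpw.tail
      have hlt : ∀ r ∈ rest, q < r := fun r hr => List.rel_of_pairwise_cons hpw hr
      rcases hq3 with hsp | hnl
      · rw [List.foldl_cons, List.foldl_cons, if_pos hsp, if_pos hsp]
        rw [pvWordA_eq_slice s inf (q + 1) hinf (by omega) (by omega)]
        exact ih _ (q + 1) (by omega) hpw'
          (fun r hr => ⟨by have := hlt r hr; omega, (hmem r (List.mem_cons_of_mem q hr)).2⟩)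
      · have hne : ¬ PySem.List.pyGetD s q ' ' = ' ' := by rw [hnl]; decide
        rw [List.foldl_cons, List.foldl_cons, if_neg hne, if_pos hnl, if_neg hne]
        rw [pvWordA_eq_slice s inf q hinf hq1 (by omega)]
        exact ih _ q (by omega) hpw'
          (fun r hr => ⟨le_of_lt (hlt r hr), (hmem r (List.mem_cons_of_mem q hr)).2⟩)

-- per line, A and B agree
lemma pvLine_eq (s : List Char) : pvLineA s = pvLineB s := by
  unfold pvLineA pvLineB
  -- A's loop body is the identity off delimiter positions
  have hbody :
      (fun (st : List (List Char) × Int) letra =>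
        if PySem.List.pyGetD s letra ' ' = ' ' then
          (st.1 ++ [pvWordA s st.2 (letra + 1)], letra + 1)
        else if PySem.List.pyGetD s letra ' ' = '\n' then
          (st.1 ++ [pvWordA s st.2 letra], letra)
        else st)
      = (fun (st : List (List Char) × Int) letra =>
          if (PySem.List.pyGetD s letra ' ' == ' ' || PySem.List.pyGetD s letra ' ' == '\n') = true then
            (if PySem.List.pyGetD s letra ' ' = ' ' then
              (st.1 ++ [pvWordA s st.2 (letra + 1)], letra + 1)
            else if PySem.List.pyGetD s letra ' ' = '\n' then
              (st.1 ++ [pvWordA s st.2 letra], letra)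
            else st)
          else st) := by
    funext st letra
    by_cases h : (PySem.List.pyGetD s letra ' ' == ' ' || PySem.List.pyGetD s letra ' ' == '\n') = true
    · rw [if_pos h]
    · have h1 : ¬ PySem.List.pyGetD s letra ' ' = ' ' := by
        intro hx; apply h; simp [hx]
      have h2 : ¬ PySem.List.pyGetD s letra ' ' = '\n' := by
        intro hx; apply h; simp [hx]
      rw [if_neg h, if_neg h1, if_neg h2]
  rw [hbody, ← List.foldl_filter]
  have hpos := pvPosB_eq s 0
  simp only [sub_zero, zero_add] at hpos
  rw [hpos]
  have hlen : PySem.List.len s = (s.length : Int) := rfl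
  rw [hlen]
  congr 1
  apply pvFoldAB
  · exact le_refl 0
  · rw [PySem.List.pyRange_zero_natCast]
    exact (List.pairwise_lt_range.map _ (by intro a b h; exact_mod_cast h)).filter _
  · intro q hq
    obtain ⟨hqm, hqp⟩ := List.mem_filter.mp hq
    obtain ⟨hq0, hqlt⟩ := PySem.List.mem_pyRange_one.mp hqm
    refine ⟨hq0, hqlt, ?_⟩
    rcases Bool.or_eq_true _ _ |>.mp hqp with h | h
    · exact Or.inl (by exact_mod_cast beq_iff_eq.mp h)
    · exact Or.inr (by exact_mod_cast beq_iff_eq.mp h)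

-- ===== VERDICT (by name: the statement is the Claim_ definition above) =====
theorem sep_palabras_spec : Claim_equal_sep_palabras := by
  intro texto _
  unfold Spec_sep_palabras sep_palabras sep_palabras_alt
  rw [PySem.List.foldl_pyRange_pyGetD texto ""
      (fun acc x => acc ++ [(pvLineA x.toList).map String.ofList]) [] (le_refl 0)]
  simp only [Int.toNat_zero, List.drop_zero]
  rw [PySem.List.foldl_append_singleton_eq_map, List.nil_append]
  apply List.map_congr_left
  intro r _
  rw [pvLine_eq]
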